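-- pv_equiv track=rewrite | github.com/leidibeatriz/convert_ascii | convert_ascii.py | converte_para_decimal
-- ===== SOURCE A (Python) =====
-- Alphabeto_Ma= ['A','B','C','D','E','F','G','H','I','J','K','L','M','N','O','P','Q','R','S','T','U','V','W','X','Y','Z']
--
-- Equivalente_ascii_ma=['65','66','67','68','69','70','71','72','73','74','75','76','77','78','79','80','81','82','83','84','85','86','87','88','89','90']
--
-- Alphabeto_Min= ['a','b','c','d','e','f','g','h','i','j','k','l','m','n','o','p','q','r','s','t','u','v','w','x','y','z']
--
-- Equivalente_ascii_min=['97','98','99','100','101','102','103','104','105','106','107','108','109','110','111','112','113','114','115','116','117','118','119','120','121','122']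
--
-- def converte_para_decimal(letra):
--     j=0
--     if(letra.isupper()):
--         for i in Alphabeto_Ma:
--             if letra == Alphabeto_Ma[j]:
--                 return Equivalente_ascii_ma[j]
--             j=j+1
--     else:
--         for i in Alphabeto_Min:
--             if letra == Alphabeto_Min[j]:
--                 return Equivalente_ascii_min[j]
--             j=j+1
-- ===== SOURCE B (Python) =====
-- def converte_para_decimal(letra):
--     if len(letra) == 1 and ('A' <= letra <= 'Z' or 'a' <= letra <= 'z'):
--         return str(ord(letra))
--     return None
-- ===== Notes on version B (the rewrite author's own statement) =====
-- stated objective: idiomatic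
-- what changed: Replaces the four 26-element parallel tables and the index-walking scan loops with a single guarded closed form str(ord(letra)).
import Mathlib
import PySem

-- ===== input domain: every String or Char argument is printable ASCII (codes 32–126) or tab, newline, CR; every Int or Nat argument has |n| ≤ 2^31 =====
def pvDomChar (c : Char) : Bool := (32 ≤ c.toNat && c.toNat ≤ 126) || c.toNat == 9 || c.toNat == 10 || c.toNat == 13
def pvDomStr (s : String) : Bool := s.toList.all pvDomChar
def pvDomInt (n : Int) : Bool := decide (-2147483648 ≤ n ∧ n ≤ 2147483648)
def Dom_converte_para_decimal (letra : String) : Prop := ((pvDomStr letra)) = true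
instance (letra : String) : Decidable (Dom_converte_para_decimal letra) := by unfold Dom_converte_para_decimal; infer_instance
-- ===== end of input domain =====

-- B replaces A's four 26-element parallel tables and index-walking scans with one guarded closed form str(ord(letra)) (idiomatic).


-- ===== PORT A =====
def pvAlphabetoMa : List String := ["A","B","C","D","E","F","G","H","I","J","K","L","M","N","O","P","Q","R","S","T","U","V","W","X","Y","Z"]
def pvEquivalenteMa : List String := ["65","66","67","68","69","70","71","72","73","74","75","76","77","78","79","80","81","82","83","84","85","86","87","88","89","90"]
def pvAlphabetoMin : List String := ["a","b","c","d","e","f","g","h","i","j","k","l","m","n","o","p","q","r","s","t","u","v","w","x","y","z"]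
def pvEquivalenteMin : List String := ["97","98","99","100","101","102","103","104","105","106","107","108","109","110","111","112","113","114","115","116","117","118","119","120","121","122"]

-- Python str.isupper(): at least one cased character and no lowercase one; hand-ported, exact on the ASCII domain (where cased = alphabetic).
def pvStrIsupper (s : String) : Bool :=
  s.toList.any PySem.Chars.isalpha && s.toList.all (fun c => !PySem.Chars.islower c)

-- the 'for i in …: if letra == table[j]: return eqv[j]; j += 1' loop, walking the two tables in step
def pvTableLoop (letra : String) : List String → List String → Option String
  | a :: as, e :: es => if letra == a then some e else pvTableLoop letra as es
  | _, _ => none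

def converte_para_decimal (letra : String) : Option String :=
  if pvStrIsupper letra then
    pvTableLoop letra pvAlphabetoMa pvEquivalenteMa
  else
    pvTableLoop letra pvAlphabetoMin pvEquivalenteMin

-- ===== PORT B =====
-- Python's string comparison 'A' <= letra <= 'Z' is code-point lexicographic = Lean's ≤ on .toList (PySem str COMPARISON note)
def converte_para_decimal_alt (letra : String) : Option String :=
  if letra.toList.length = 1 ∧
      ((("A":String).toList ≤ letra.toList ∧ letra.toList ≤ ("Z":String).toList) ∨
       (("a":String).toList ≤ letra.toList ∧ letra.toList ≤ ("z":String).toList)) then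
    some (PySem.Int.toStr (letra.toList.headI.toNat))
  else
    none

-- ===== PRECONDITION & SPEC =====
def Spec_converte_para_decimal (letra : String) (out : Option String) : Prop := out = converte_para_decimal_alt letra
instance (letra : String) (out : Option String) : Decidable (Spec_converte_para_decimal letra out) := by unfold Spec_converte_para_decimal; infer_instance

-- ===== CLAIM (what is proved, stated in full; the proofs are below) =====
def Claim_equal_converte_para_decimal : Prop := ∀ (letra : String), Dom_converte_para_decimal letra → Spec_converte_para_decimal letra (converte_para_decimal letra)

-- ===== LEMMAS AND PROOFS =====
def pvCheckChar (n : Nat) : Bool :=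
  decide (converte_para_decimal (String.ofList [Char.ofNat n]) = converte_para_decimal_alt (String.ofList [Char.ofNat n]))

set_option maxRecDepth 4000 in
theorem pvAllChars : ∀ n : Fin 128, pvCheckChar n.val = true := by decide

theorem pvTableLoop_none (letra : String) (alpha eqv : List String)
    (h : ∀ a ∈ alpha, a.toList.length = 1) (hl : letra.toList.length ≠ 1) :
    pvTableLoop letra alpha eqv = none := by
  induction alpha generalizing eqv with
  | nil => cases eqv <;> rfl
  | cons a as ih =>
    cases eqv with
    | nil => rfl
    | cons e es =>
      have hne : letra ≠ a := by
        intro hEq; exact hl (by rw [hEq]; exact h a (List.mem_cons_self ..))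
      simp only [pvTableLoop, beq_iff_eq, if_neg hne]
      exact ih es (fun x hx => h x (List.mem_cons_of_mem _ hx))

theorem converte_para_decimal_spec : Claim_equal_converte_para_decimal := by
  unfold Claim_equal_converte_para_decimal
  intro letra hdom
  unfold Spec_converte_para_decimal
  match hcs : letra.toList with
  | [] =>
    have : letra = "" := by
      have h0 := congrArg String.ofList hcs
      rwa [String.ofList_toList] at h0
    subst this; decide
  | [c] =>
    have hletra : letra = String.ofList [c] := by
      have h0 := congrArg String.ofList hcs
      rwa [String.ofList_toList] at h0
    have hc : pvDomChar c = true := by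
      have := hdom; unfold Dom_converte_para_decimal pvDomStr at this
      rw [hcs] at this; simpa using this
    have hlt : c.toNat < 128 := by
      unfold pvDomChar at hc; simp at hc; omega
    have hkey := pvAllChars ⟨c.toNat, hlt⟩
    unfold pvCheckChar at hkey
    rw [Char.ofNat_toNat] at hkey
    rw [hletra]
    exact of_decide_eq_true hkey
  | c1 :: c2 :: rest =>
    have hl : letra.toList.length ≠ 1 := by rw [hcs]; simp
    have h1 : ∀ a ∈ pvAlphabetoMa, a.toList.length = 1 := by decide
    have h2 : ∀ a ∈ pvAlphabetoMin, a.toList.length = 1 := by decide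
    have halt : converte_para_decimal_alt letra = none := by
      unfold converte_para_decimal_alt
      apply if_neg
      simp [hcs]
    rw [halt]
    unfold converte_para_decimal
    split
    · exact pvTableLoop_none letra _ _ h1 hl
    · exact pvTableLoop_none letra _ _ h2 hl
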